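-- pv_equiv track=rewrite | github.com/tyranich/python-project-lvl1 | brain_games/games/brain_progression.py | create_ret_str
-- ===== SOURCE A (Python) =====
-- def create_ret_str(str_prog, cut_str):
--
--     return_string = ""
--
--     for _ in range(len(str_prog)):
--         if _ == cut_str + 2 and str_prog[cut_str + 2] != ' ':
--             return_string = return_string + "."
--         elif _ != cut_str and _ != cut_str + 1:
--             return_string = return_string + str_prog[_]
--         else:
--             return_string = return_string + "."
--
--     return return_string
-- ===== SOURCE B (Python) =====
-- def create_ret_str(str_prog, cut_str):
--     chars = list(str_prog)
--     n = len(chars)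
--     for p in (cut_str, cut_str + 1):
--         if 0 <= p < n:
--             chars[p] = '.'
--     p = cut_str + 2
--     if 0 <= p < n and str_prog[p] != ' ':
--         chars[p] = '.'
--     return ''.join(chars)
-- ===== Notes on version B (the rewrite author's own statement) =====
-- stated objective: simpler
-- what changed: Replaces the per-character loop with its three-way branch by a copy-then-patch: copy the string once and overwrite at most the three affected positions (with bounds guards and the space exception at cut_str+2).
import Mathlib
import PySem

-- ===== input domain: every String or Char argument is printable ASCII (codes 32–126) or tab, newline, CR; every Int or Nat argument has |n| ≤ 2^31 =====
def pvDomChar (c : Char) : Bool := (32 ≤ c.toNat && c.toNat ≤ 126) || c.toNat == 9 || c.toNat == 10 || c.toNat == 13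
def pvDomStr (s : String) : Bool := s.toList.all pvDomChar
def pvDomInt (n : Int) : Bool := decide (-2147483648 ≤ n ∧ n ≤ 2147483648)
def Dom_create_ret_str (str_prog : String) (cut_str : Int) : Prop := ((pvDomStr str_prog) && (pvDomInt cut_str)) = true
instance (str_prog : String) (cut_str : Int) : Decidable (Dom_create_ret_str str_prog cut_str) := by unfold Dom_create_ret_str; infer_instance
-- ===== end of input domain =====

-- B replaces A's per-character loop-and-branch by copy-then-patch (overwrite at most 3 positions); objective: simpler.

-- ===== PORT A =====
-- A appends char by char over range(len(str_prog)); indices in the taken branches are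
-- always in range (str_prog[cut_str+2] is only read when the loop index equals cut_str+2),
-- so getD with a dummy default ' ' is exact. A is total.
def create_ret_str (str_prog : String) (cut_str : Int) : String :=
  let cs := str_prog.toList
  String.ofList ((List.range cs.length).foldl (fun (acc : List Char) (i : Nat) =>
    if (i : Int) = cut_str + 2 ∧ cs.getD i ' ' ≠ ' ' then acc ++ ['.']
    else if (i : Int) ≠ cut_str ∧ (i : Int) ≠ cut_str + 1 then acc ++ [cs.getD i ' ']
    else acc ++ ['.']) [])

-- ===== PORT B =====
-- chars[p] = '.' guarded by 0 <= p < n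
def pvPatch (l : List Char) (p : Int) : List Char :=
  if 0 ≤ p ∧ p < (l.length : Int) then l.set p.toNat '.' else l

def create_ret_str_alt (str_prog : String) (cut_str : Int) : String :=
  let cs := str_prog.toList
  let cs1 := pvPatch cs cut_str
  let cs2 := pvPatch cs1 (cut_str + 1)
  let p := cut_str + 2
  let cs3 := if 0 ≤ p ∧ p < (cs2.length : Int) ∧ cs.getD p.toNat ' ' ≠ ' '
             then cs2.set p.toNat '.' else cs2
  String.ofList cs3

-- ===== PRECONDITION & SPEC =====
def Spec_create_ret_str (str_prog : String) (cut_str : Int) (out : String) : Prop := out = create_ret_str_alt str_prog cut_str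
instance (str_prog : String) (cut_str : Int) (out : String) : Decidable (Spec_create_ret_str str_prog cut_str out) := by unfold Spec_create_ret_str; infer_instance

-- ===== CLAIM (what is proved, stated in full; the proofs are below) =====
def Claim_equal_create_ret_str : Prop := ∀ (str_prog : String) (cut_str : Int), Dom_create_ret_str str_prog cut_str → Spec_create_ret_str str_prog cut_str (create_ret_str str_prog cut_str)

-- ===== LEMMAS AND PROOFS =====

-- the per-index character A's loop body produces
def pvChar (cs : List Char) (c : Int) (i : Nat) : Char :=
  if (i : Int) = c + 2 ∧ cs.getD i ' ' ≠ ' ' then '.'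
  else if (i : Int) ≠ c ∧ (i : Int) ≠ c + 1 then cs.getD i ' '
  else '.'

theorem pv_foldl_map (h : Nat → Char) : ∀ (n : Nat),
    (List.range n).foldl (fun acc i => acc ++ [h i]) [] = (List.range n).map h := by
  intro n
  induction n with
  | zero => simp
  | succ k ih => simp [List.range_succ, ih]

theorem pv_A_eq (s : String) (c : Int) :
    create_ret_str s c = String.ofList ((List.range s.toList.length).map (pvChar s.toList c)) := by
  show String.ofList ((List.range s.toList.length).foldl (fun (acc : List Char) (i : Nat) =>
    if (i : Int) = c + 2 ∧ s.toList.getD i ' ' ≠ ' ' then acc ++ ['.']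
    else if (i : Int) ≠ c ∧ (i : Int) ≠ c + 1 then acc ++ [s.toList.getD i ' ']
    else acc ++ ['.']) []) = _
  have hfun : (fun (acc : List Char) (i : Nat) =>
      if (i : Int) = c + 2 ∧ s.toList.getD i ' ' ≠ ' ' then acc ++ ['.']
      else if (i : Int) ≠ c ∧ (i : Int) ≠ c + 1 then acc ++ [s.toList.getD i ' ']
      else acc ++ ['.'])
      = fun (acc : List Char) (i : Nat) => acc ++ [pvChar s.toList c i] := by
    funext acc i
    simp only [pvChar]
    split_ifs <;> rfl
  rw [hfun, pv_foldl_map]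

theorem pvPatch_length (l : List Char) (p : Int) : (pvPatch l p).length = l.length := by
  unfold pvPatch; split_ifs <;> simp

theorem pvPatch_getElem (l : List Char) (p : Int) (i : Nat) (hi : i < l.length) :
    (pvPatch l p)[i]'(by rw [pvPatch_length]; exact hi)
      = if (i : Int) = p then '.' else l[i] := by
  unfold pvPatch
  by_cases h1 : 0 ≤ p ∧ p < (l.length : Int)
  · simp only [if_pos h1, List.getElem_set]
    by_cases h : (i : Int) = p
    · have hn : p.toNat = i := by omega
      rw [if_pos hn, if_pos h]
    · have hn : ¬ p.toNat = i := by omega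
      rw [if_neg hn, if_neg h]
  · simp only [if_neg h1]
    have : ¬ (i : Int) = p := by omega
    rw [if_neg this]

theorem pv_B_list (cs : List Char) (c : Int) :
    (if 0 ≤ c + 2 ∧ c + 2 < ((pvPatch (pvPatch cs c) (c + 1)).length : Int) ∧
        cs.getD (c + 2).toNat ' ' ≠ ' '
     then (pvPatch (pvPatch cs c) (c + 1)).set (c + 2).toNat '.'
     else pvPatch (pvPatch cs c) (c + 1))
      = (List.range cs.length).map (pvChar cs c) := by
  have hlen2 : (pvPatch (pvPatch cs c) (c + 1)).length = cs.length := by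
    rw [pvPatch_length, pvPatch_length]
  apply List.ext_getElem
  · split_ifs <;> simp [hlen2]
  · intro i h1 h2
    have hi : i < cs.length := by simpa using h2
    have hi2 : i < (pvPatch (pvPatch cs c) (c + 1)).length := by rw [hlen2]; exact hi
    have hget2 : (pvPatch (pvPatch cs c) (c + 1))[i]'hi2
        = if (i : Int) = c + 1 then '.' else if (i : Int) = c then '.' else cs[i] := by
      rw [pvPatch_getElem _ _ _ (by rw [pvPatch_length]; exact hi)]
      by_cases h : (i : Int) = c + 1
      · rw [if_pos h, if_pos h]
      · rw [if_neg h, if_neg h, pvPatch_getElem _ _ _ hi]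
    have hgd : cs.getD i ' ' = cs[i] := List.getD_eq_getElem cs ' ' hi
    simp only [List.getElem_map, List.getElem_range, pvChar]
    split_ifs with hc
    · -- the cut_str+2 patch fired
      obtain ⟨hp0, hplen, hpne⟩ := hc
      rw [List.getElem_set]
      by_cases hip : (c + 2).toNat = i
      · have hieq : (i : Int) = c + 2 := by omega
        have hne : cs.getD i ' ' ≠ ' ' := by rw [← hip]; exact hpne
        rw [if_pos hip, if_pos ⟨hieq, hne⟩]
      · have hine : ¬ (i : Int) = c + 2 := by omega
        rw [if_neg hip, hget2,
          if_neg (show ¬ ((i : Int) = c + 2 ∧ cs.getD i ' ' ≠ ' ') from fun h => hine h.1)]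
        by_cases ha : (i : Int) = c + 1
        · rw [if_pos ha,
            if_neg (show ¬ ((i : Int) ≠ c ∧ (i : Int) ≠ c + 1) from fun h => h.2 ha)]
        · by_cases hb : (i : Int) = c
          · rw [if_neg ha, if_pos hb,
              if_neg (show ¬ ((i : Int) ≠ c ∧ (i : Int) ≠ c + 1) from fun h => h.1 hb)]
          · rw [if_neg ha, if_neg hb,
              if_pos (show (i : Int) ≠ c ∧ (i : Int) ≠ c + 1 from ⟨hb, ha⟩), hgd]
    · -- no patch at cut_str+2: A's first branch cannot fire either (space there, or c+2 out of range)
      push Not at hc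
      rw [hget2]
      by_cases hine : (i : Int) = c + 2
      · have hp0 : (0:Int) ≤ c + 2 := by omega
        have hplen : c + 2 < ((pvPatch (pvPatch cs c) (c + 1)).length : Int) := by
          rw [hlen2]; omega
        have hsp : cs.getD (c + 2).toNat ' ' = ' ' := by
          by_contra hne; exact hne (hc hp0 hplen)
        have hitn : (c + 2).toNat = i := by omega
        rw [hitn] at hsp
        have ha : ¬ (i : Int) = c + 1 := by omega
        have hb : ¬ (i : Int) = c := by omega
        rw [if_neg ha, if_neg hb,
          if_neg (show ¬ ((i : Int) = c + 2 ∧ cs.getD i ' ' ≠ ' ') from fun h => h.2 hsp),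
          if_pos (show (i : Int) ≠ c ∧ (i : Int) ≠ c + 1 from ⟨hb, ha⟩), hgd]
      · rw [if_neg (show ¬ ((i : Int) = c + 2 ∧ cs.getD i ' ' ≠ ' ') from fun h => hine h.1)]
        by_cases ha : (i : Int) = c + 1
        · rw [if_pos ha,
            if_neg (show ¬ ((i : Int) ≠ c ∧ (i : Int) ≠ c + 1) from fun h => h.2 ha)]
        · by_cases hb : (i : Int) = c
          · rw [if_neg ha, if_pos hb,
              if_neg (show ¬ ((i : Int) ≠ c ∧ (i : Int) ≠ c + 1) from fun h => h.1 hb)]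
          · rw [if_neg ha, if_neg hb,
              if_pos (show (i : Int) ≠ c ∧ (i : Int) ≠ c + 1 from ⟨hb, ha⟩), hgd]

theorem pv_B_eq (s : String) (c : Int) :
    create_ret_str_alt s c = String.ofList ((List.range s.toList.length).map (pvChar s.toList c)) :=
  congrArg String.ofList (pv_B_list s.toList c)

-- ===== VERDICT (by name: the statement is the Claim_ definition above) =====
theorem create_ret_str_spec : Claim_equal_create_ret_str := by
  intro s c _
  unfold Spec_create_ret_str
  rw [pv_A_eq, pv_B_eq]
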